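-- pv_equiv track=rewrite | github.com/navchetna/tender-eval | comps/dataprep/tocsearch.py | extract_answers_after_question_lines
-- ===== SOURCE A (Python) =====
-- def extract_answers_after_question_lines(response_text):
--     answers = []
--     lines = response_text.strip().split('\n')
--
--     found_question = False
--     for line in lines:
--         if found_question:
--             # This line immediately follows a "Question" line
--             if line.strip(): # Ensure the line is not empty
--                 answers.append(line.strip())
--             found_question = False # Reset the flag
--
--         # Check if the current line contains the word "Question"
--         # Using a case-insensitive search
--         if "Question" in line: # Or re.search(r'\bQuestion\b', line, re.IGNORECASE) for word boundary
--             found_question = True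
--
--     return answers
-- ===== SOURCE B (Python) =====
-- def extract_answers_after_question_lines(response_text):
--     lines = response_text.strip().split('\n')
--     # Stage 1: index every line that contains the marker word.
--     question_idxs = [i for i, line in enumerate(lines) if "Question" in line]
--     # Stage 2: resolve each recorded index to its successor line by position.
--     return [lines[i + 1].strip() for i in question_idxs
--             if i + 1 < len(lines) and lines[i + 1].strip()]
-- ===== Notes on version B (the rewrite author's own statement) =====
-- stated objective: alternative
-- what changed: Replaces A's stateful flag-carrying single pass with two staged passes: first build the list of indices of lines containing 'Question', then resolve each recorded index to lines[i+1] by positional lookup.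
import Mathlib
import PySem

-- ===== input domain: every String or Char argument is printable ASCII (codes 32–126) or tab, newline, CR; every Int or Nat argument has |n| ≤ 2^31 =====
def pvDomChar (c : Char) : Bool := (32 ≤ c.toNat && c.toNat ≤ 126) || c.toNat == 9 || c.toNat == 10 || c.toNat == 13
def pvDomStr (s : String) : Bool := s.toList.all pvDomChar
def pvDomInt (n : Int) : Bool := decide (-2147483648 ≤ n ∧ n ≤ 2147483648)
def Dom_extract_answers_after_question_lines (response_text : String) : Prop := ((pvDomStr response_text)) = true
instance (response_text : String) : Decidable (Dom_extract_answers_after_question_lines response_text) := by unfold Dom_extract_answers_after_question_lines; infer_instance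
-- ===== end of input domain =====

-- B replaces A's stateful flag-carrying single pass with two staged passes
-- (index the marker lines, then resolve each index to its successor line);
-- alternative decomposition, same return value everywhere.

-- ===== PORT A =====
-- A's for-loop over lines carrying (found_question, answers); branches in source order.
def pvALoop : List String → Bool → List String → List String
  | [], _, acc => acc
  | line :: rest, found_question, acc =>
    let acc' :=
      if found_question then
        (if PySem.Str.strip line ≠ "" then acc ++ [PySem.Str.strip line] else acc)
      else acc
    pvALoop rest (PySem.Str.isIn "Question" line) acc'

def extract_answers_after_question_lines (response_text : String) : List String :=
  let lines := (PySem.Str.split? (PySem.Str.strip response_text) "\n").getD []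
  pvALoop lines false []

-- ===== PORT B =====
def extract_answers_after_question_lines_alt (response_text : String) : List String :=
  let lines := (PySem.Str.split? (PySem.Str.strip response_text) "\n").getD []
  -- Stage 1: [i for i, line in enumerate(lines) if "Question" in line]
  let question_idxs := (PySem.List.enumerate lines 0).filterMap
    (fun p => if PySem.Str.isIn "Question" p.2 then some p.1 else none)
  -- Stage 2: [lines[i+1].strip() for i in question_idxs if i+1 < len(lines) and lines[i+1].strip()]
  -- lines[i+1] is guarded in range with i ≥ 0, so pyGetD is exact here.
  question_idxs.filterMap (fun i =>
    if i + 1 < (lines.length : Int) ∧ PySem.Str.strip (PySem.List.pyGetD lines (i + 1) "") ≠ "" then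
      some (PySem.Str.strip (PySem.List.pyGetD lines (i + 1) ""))
    else none)

-- ===== PRECONDITION & SPEC =====
def Spec_extract_answers_after_question_lines (response_text : String) (out : List String) : Prop := out = extract_answers_after_question_lines_alt response_text
instance (response_text : String) (out : List String) : Decidable (Spec_extract_answers_after_question_lines response_text out) := by unfold Spec_extract_answers_after_question_lines; infer_instance

-- ===== CLAIM (what is proved, stated in full; the proofs are below) =====
def Claim_equal_extract_answers_after_question_lines : Prop := ∀ (response_text : String), Dom_extract_answers_after_question_lines response_text → Spec_extract_answers_after_question_lines response_text (extract_answers_after_question_lines response_text)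

-- ===== LEMMAS AND PROOFS =====

-- Common reference value: the answers, expressed over adjacent line pairs.
def pvPairs (lines : List String) : List String :=
  (lines.zip lines.tail).filterMap (fun p =>
    if PySem.Str.isIn "Question" p.1 && PySem.Str.strip p.2 ≠ "" then
      some (PySem.Str.strip p.2)
    else none)

-- A's loop emits its appends in order after whatever is already accumulated.
theorem pvALoop_append (ls : List String) (fq : Bool) (acc : List String) :
    pvALoop ls fq acc = acc ++ pvALoop ls fq [] := by
  induction ls generalizing fq acc with
  | nil => simp [pvALoop]
  | cons l rest ih =>
    simp only [pvALoop]
    rw [ih]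
    conv_rhs => rw [ih]
    split_ifs <;> simp

-- A's loop, entered with the flag computed from a previous line `cur`, produces
-- exactly the pairwise reference on `cur :: ls`.
theorem pvALoop_eq_pairs (ls : List String) (cur : String) :
    pvALoop ls (PySem.Str.isIn "Question" cur) [] = pvPairs (cur :: ls) := by
  induction ls generalizing cur with
  | nil => simp [pvALoop, pvPairs]
  | cons l rest ih =>
    simp only [pvALoop]
    rw [pvALoop_append, ih l]
    cases hq : PySem.Str.isIn "Question" cur <;>
      by_cases hs : PySem.Str.strip l = "" <;>
        simp_all [pvPairs]

-- B's two stages fused: the per-(index, line) step of the staged computation.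
def pvG (full : List String) (p : Int × String) : Option String :=
  (if PySem.Str.isIn "Question" p.2 then some p.1 else none).bind (fun i =>
    if i + 1 < (full.length : Int) ∧ PySem.Str.strip (PySem.List.pyGetD full (i + 1) "") ≠ "" then
      some (PySem.Str.strip (PySem.List.pyGetD full (i + 1) ""))
    else none)

-- Positional lookup: the element of pre ++ suf at index |pre| + 1 is suf[1] (default d).
theorem pvGetD_shift (pre suf : List String) (d : String) :
    PySem.List.pyGetD (pre ++ suf) ((pre.length : Int) + 1) d = suf.getD 1 d := by
  have : ((pre.length : Int) + 1) = ((pre.length + 1 : Nat) : Int) := by push_cast; ring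
  rw [this, PySem.List.pyGetD_natCast]
  simp [List.getD, List.getElem?_append_right]

-- The staged pass over a suffix, with indices offset by the prefix length and
-- lookups into the full list, equals the pairwise reference on the suffix.
theorem pvStaged_eq_pairs (suf : List String) : ∀ (pre : List String),
    (PySem.List.enumerate suf (pre.length : Int)).filterMap (pvG (pre ++ suf)) = pvPairs suf := by
  induction suf with
  | nil => intro pre; simp [PySem.List.enumerate, pvPairs]
  | cons l rest ih =>
    intro pre
    rw [PySem.List.enumerate_cons, List.filterMap_cons]
    have hfull : pre ++ l :: rest = (pre ++ [l]) ++ rest := by simp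
    have hlen : ((pre ++ [l]).length : Int) = (pre.length : Int) + 1 := by
      simp [List.length_append]
    have htail :
        (PySem.List.enumerate rest ((pre.length : Int) + 1)).filterMap (pvG (pre ++ l :: rest))
          = pvPairs rest := by
      rw [hfull, ← hlen]; exact ih (pre ++ [l])
    rw [htail]
    by_cases hq : PySem.Chars.isIn ['Q','u','e','s','t','i','o','n'] l.toList = true
    · cases rest with
      | nil =>
        simp [pvG, hq, pvPairs]
      | cons r rr =>
        have hc : ((pre.length : Int) + 1 < (pre.length : Int) + ((rr.length : Int) + 1 + 1)) := by
          omega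
        have hget : PySem.List.pyGetD (pre ++ l :: r :: rr) ((pre.length : Int) + 1) "" = r := by
          simpa [List.getD] using pvGetD_shift pre (l :: r :: rr) ""
        by_cases hs : PySem.Str.strip r = "" <;>
          simp [pvG, hq, hget, hs, hc, pvPairs]
    · cases rest with
      | nil => simp [pvG, hq, pvPairs]
      | cons r rr => simp [pvG, hq, pvPairs]

-- B equals the pairwise reference.
theorem pvAlt_eq_pairs (lines : List String) :
    (((PySem.List.enumerate lines 0).filterMap
        (fun p => if PySem.Str.isIn "Question" p.2 then some p.1 else none)).filterMap
      (fun i =>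
        if i + 1 < (lines.length : Int) ∧ PySem.Str.strip (PySem.List.pyGetD lines (i + 1) "") ≠ "" then
          some (PySem.Str.strip (PySem.List.pyGetD lines (i + 1) ""))
        else none)) = pvPairs lines := by
  rw [List.filterMap_filterMap]
  have h0 : (0 : Int) = (([] : List String).length : Int) := by simp
  have := pvStaged_eq_pairs lines []
  simpa [pvG, List.nil_append] using this

-- ===== VERDICT (by name: the statement is the Claim_ definition above) =====
theorem extract_answers_after_question_lines_spec : Claim_equal_extract_answers_after_question_lines := by
  intro response_text _
  unfold Spec_extract_answers_after_question_lines
  unfold extract_answers_after_question_lines extract_answers_after_question_lines_alt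
  rw [pvAlt_eq_pairs]
  cases h : (PySem.Str.split? (PySem.Str.strip response_text) "\n").getD [] with
  | nil => simp [pvALoop, pvPairs]
  | cons l rest =>
    simp only [pvALoop, Bool.false_eq_true, if_neg, not_false_iff]
    rw [pvALoop_eq_pairs]
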